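-- pv_equiv track=rewrite | github.com/dborberg/ai-research-pipeline | app/fetch_rss_articles.py | _compute_priority_score
-- ===== SOURCE A (Python) =====
-- def _compute_priority_score(title: str, summary: str) -> int:
--     text = f"{title} {summary}".lower()
--     score = 0
--
--     # Core AI
--     if "ai" in text:
--         score += 1
--
--     # Infrastructure (high value)
--     if any(keyword in text for keyword in ["data center", "power", "grid", "electricity"]):
--         score += 3
--
--     # Semiconductors / hardware
--     if any(keyword in text for keyword in ["nvidia", "semiconductor", "gpu", "chip"]):
--         score += 2
--
--     # Capex / buildout
--     if any(keyword in text for keyword in ["capex", "spending", "investment", "buildout", "infrastructure"]):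
--         score += 2
--
--     # Enterprise adoption / ROI
--     if any(keyword in text for keyword in ["enterprise", "roi", "productivity", "automation"]):
--         score += 2
--
--     # Labor + macro impact
--     if any(keyword in text for keyword in ["labor", "jobs", "hiring", "workforce"]):
--         score += 1
--
--     # Regulation / policy
--     if any(keyword in text for keyword in ["regulation", "policy", "compliance", "governance"]):
--         score += 2
--
--     # Energy / utilities
--     if any(keyword in text for keyword in ["utility", "energy demand", "nuclear", "grid capacity"]):
--         score += 2
--
--     if any(k in text for k in [
--         "robot", "robotics", "autonomous", "humanoid",
--         "factory automation", "industrial automation",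
--         "embodied ai", "edge ai", "sensor", "uav", "drone"
--     ]):
--         score += 2
--
--     return score
-- ===== SOURCE B (Python) =====
-- _GROUPS = [
--     (["ai"], 1),
--     (["data center", "power", "grid", "electricity"], 3),
--     (["nvidia", "semiconductor", "gpu", "chip"], 2),
--     (["capex", "spending", "investment", "buildout", "infrastructure"], 2),
--     (["enterprise", "roi", "productivity", "automation"], 2),
--     (["labor", "jobs", "hiring", "workforce"], 1),
--     (["regulation", "policy", "compliance", "governance"], 2),
--     (["utility", "energy demand", "nuclear", "grid capacity"], 2),
--     (["robot", "robotics", "autonomous", "humanoid",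
--       "factory automation", "industrial automation",
--       "embodied ai", "edge ai", "sensor", "uav", "drone"], 2),
-- ]
--
-- # dispatch table: first character -> [(keyword, group index)]
-- _INDEX = {}
-- for _gi, (_kws, _w) in enumerate(_GROUPS):
--     for _k in _kws:
--         _INDEX.setdefault(_k[0], []).append((_k, _gi))
--
--
-- def _compute_priority_score(title: str, summary: str) -> int:
--     # Single left-to-right scan over the text with a first-character dispatch
--     # table: at each position only the keywords starting with that character
--     # are tried; matched groups are flagged, then their weights are summed.
--     text = f"{title} {summary}".lower()
--     hit = [False] * len(_GROUPS)
--     for i, c in enumerate(text):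
--         for k, gi in _INDEX.get(c, ()):
--             if text.startswith(k, i):
--                 hit[gi] = True
--     score = 0
--     for h, (_, w) in zip(hit, _GROUPS):
--         if h:
--             score += w
--     return score
-- ===== Notes on version B (the rewrite author's own statement) =====
-- stated objective: alternative
-- what changed: Instead of nine per-group 'keyword in text' substring searches, B precomputes a first-character dispatch table over all keywords and makes one left-to-right scan of the text, at each position trying only the keywords starting with that character, flagging matched groups in a hits vector and summing the flagged groups' weights.
import Mathlib
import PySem

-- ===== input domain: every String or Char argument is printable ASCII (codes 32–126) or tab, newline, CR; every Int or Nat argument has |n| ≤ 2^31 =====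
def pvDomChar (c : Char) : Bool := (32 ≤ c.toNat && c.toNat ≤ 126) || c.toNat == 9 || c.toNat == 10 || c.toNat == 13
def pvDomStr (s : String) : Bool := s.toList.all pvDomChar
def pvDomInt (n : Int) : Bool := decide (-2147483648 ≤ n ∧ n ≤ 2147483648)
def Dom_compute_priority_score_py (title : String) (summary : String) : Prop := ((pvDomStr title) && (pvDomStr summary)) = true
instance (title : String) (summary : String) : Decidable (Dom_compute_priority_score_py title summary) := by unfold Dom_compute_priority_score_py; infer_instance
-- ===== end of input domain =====

-- B replaces A's nine per-group substring searches by a single left-to-right scan of the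
-- text with a first-character dispatch table over all keywords (objective: alternative).

-- ===== PORT A =====
-- literal transliteration: text = (title + " " + summary).lower(); nine sequential if-blocks updating score
def compute_priority_score_py (title : String) (summary : String) : Int :=
  let text : List Char := PySem.Chars.lower (title.toList ++ [' '] ++ summary.toList)
  let score : Int := 0
  let score := if PySem.Chars.isIn "ai".toList text then score + 1 else score
  let score := if ["data center", "power", "grid", "electricity"].any
      (fun keyword => PySem.Chars.isIn keyword.toList text) then score + 3 else score
  let score := if ["nvidia", "semiconductor", "gpu", "chip"].any
      (fun keyword => PySem.Chars.isIn keyword.toList text) then score + 2 else score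
  let score := if ["capex", "spending", "investment", "buildout", "infrastructure"].any
      (fun keyword => PySem.Chars.isIn keyword.toList text) then score + 2 else score
  let score := if ["enterprise", "roi", "productivity", "automation"].any
      (fun keyword => PySem.Chars.isIn keyword.toList text) then score + 2 else score
  let score := if ["labor", "jobs", "hiring", "workforce"].any
      (fun keyword => PySem.Chars.isIn keyword.toList text) then score + 1 else score
  let score := if ["regulation", "policy", "compliance", "governance"].any
      (fun keyword => PySem.Chars.isIn keyword.toList text) then score + 2 else score
  let score := if ["utility", "energy demand", "nuclear", "grid capacity"].any
      (fun keyword => PySem.Chars.isIn keyword.toList text) then score + 2 else score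
  let score := if ["robot", "robotics", "autonomous", "humanoid",
      "factory automation", "industrial automation",
      "embodied ai", "edge ai", "sensor", "uav", "drone"].any
      (fun k => PySem.Chars.isIn k.toList text) then score + 2 else score
  score

-- ===== PORT B =====
-- the (keywords, weight) groups of Source B
def pvGroups : List (List String × Int) :=
  [ (["ai"], 1),
    (["data center", "power", "grid", "electricity"], 3),
    (["nvidia", "semiconductor", "gpu", "chip"], 2),
    (["capex", "spending", "investment", "buildout", "infrastructure"], 2),
    (["enterprise", "roi", "productivity", "automation"], 2),
    (["labor", "jobs", "hiring", "workforce"], 1),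
    (["regulation", "policy", "compliance", "governance"], 2),
    (["utility", "energy demand", "nuclear", "grid capacity"], 2),
    (["robot", "robotics", "autonomous", "humanoid",
      "factory automation", "industrial automation",
      "embodied ai", "edge ai", "sensor", "uav", "drone"], 2) ]

-- Source B's module-level dispatch table _INDEX: first character -> [(keyword, group index)];
-- Python's _k[0] on the (all nonempty) keywords is headD; setdefault(c, []).append(p) is modify c [] (· ++ [p])
def pvIndex : PySem.Dict Char (List (String × Nat)) :=
  pvGroups.zipIdx.foldl
    (fun d gp => gp.1.1.foldl
      (fun d k => d.modify (k.toList.headD ' ') [] (· ++ [(k, gp.2)])) d)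
    PySem.Dict.empty

-- one scan over enumerate(text); Python's text.startswith(k, i) with 0 ≤ i ≤ len(text)
-- is exactly startswith on text.drop i
def compute_priority_score_py_alt (title : String) (summary : String) : Int :=
  let text : List Char := PySem.Chars.lower (title.toList ++ [' '] ++ summary.toList)
  let hit0 : List Bool := pvGroups.map (fun _ => false)
  let hit := (PySem.List.enumerate text 0).foldl
    (fun hit ic =>
      (PySem.Dict.getD pvIndex ic.2 []).foldl
        (fun hit kg =>
          if PySem.Chars.startswith (text.drop ic.1.toNat) kg.1.toList
          then hit.set kg.2 true else hit)
        hit)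
    hit0
  (hit.zip pvGroups).foldl (fun acc p => if p.1 then acc + p.2.2 else acc) 0

-- ===== PRECONDITION & SPEC =====
def Spec_compute_priority_score_py (title : String) (summary : String) (out : Int) : Prop := out = compute_priority_score_py_alt title summary
instance (title : String) (summary : String) (out : Int) : Decidable (Spec_compute_priority_score_py title summary out) := by unfold Spec_compute_priority_score_py; infer_instance

-- ===== CLAIM (what is proved, stated in full; the proofs are below) =====
def Claim_equal_compute_priority_score_py : Prop := ∀ (title : String) (summary : String), Dom_compute_priority_score_py title summary → Spec_compute_priority_score_py title summary (compute_priority_score_py title summary)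

-- ===== LEMMAS AND PROOFS =====

-- zipping a mapped list with its source pairs each element with its image
theorem pv_zip_map_self {α β : Type} (F : α → β) :
    ∀ (gs : List α), (gs.map F).zip gs = gs.map (fun g => (F g, g)) := by
  intro gs
  induction gs with
  | nil => simp
  | cons g gs ih => simp [ih]

-- membership in pvGroups.zipIdx names an in-range index and the group there
theorem pv_zipIdx_spec (gp : (List String × Int) × Nat) (h : gp ∈ pvGroups.zipIdx) :
    ∃ hlt : gp.2 < pvGroups.length, gp.1 = pvGroups[gp.2] := by
  obtain ⟨g, i⟩ := gp
  obtain ⟨-, h2, h3⟩ := List.mem_zipIdx h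
  exact ⟨by simpa using h2, by simpa using h3⟩

-- every entry of the dispatch table names a group index in range, a keyword of that
-- group, and a nonempty keyword (finite check over the concrete table)
set_option maxRecDepth 100000 in
theorem pv_items_sound :
    ∀ p ∈ pvIndex.items, ∀ kg ∈ p.2,
      kg.2 < pvGroups.length ∧ kg.1 ∈ (pvGroups.getD kg.2 ([], 0)).1 ∧ kg.1.toList ≠ [] := by
  decide

-- the same, read through an arbitrary-character lookup
theorem pv_bucket_sound (c : Char) (kg : String × Nat)
    (h : kg ∈ PySem.Dict.getD pvIndex c []) :
    kg.2 < pvGroups.length ∧ kg.1 ∈ (pvGroups.getD kg.2 ([], 0)).1 ∧ kg.1.toList ≠ [] := by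
  rw [PySem.Dict.getD_eq_get?_getD] at h
  cases hg : pvIndex.get? c with
  | none => rw [hg] at h; simp at h
  | some v =>
    rw [hg] at h
    exact pv_items_sound (c, v) (PySem.Dict.mem_items_of_get?_eq_some pvIndex hg) kg h

-- every keyword of every group is listed in the dispatch table under its first character
set_option maxRecDepth 100000 in
theorem pv_complete :
    ∀ gp ∈ pvGroups.zipIdx, ∀ k ∈ gp.1.1,
      (k, gp.2) ∈ PySem.Dict.getD pvIndex (k.toList.headD ' ') [] := by
  decide

-- a set-if fold over candidate events, read back pointwise
theorem pv_getD_foldl_set (p : String × Nat → Bool) (g : Nat) :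
    ∀ (cs : List (String × Nat)) (hit : List Bool),
      (∀ kg ∈ cs, kg.2 < hit.length) →
      ((cs.foldl (fun h kg => if p kg then h.set kg.2 true else h) hit).getD g false
        = (hit.getD g false || cs.any (fun kg => kg.2 == g && p kg))) := by
  intro cs
  induction cs with
  | nil => intro hit _; simp
  | cons kg cs ih =>
    intro hit hb
    rw [List.foldl_cons, List.any_cons]
    by_cases hp : p kg
    · rw [if_pos hp, ih _ (fun x hx => by rw [List.length_set]; exact hb x (List.mem_cons_of_mem _ hx))]
      by_cases hg : kg.2 = g
      · have hlt : g < hit.length := hg ▸ hb kg List.mem_cons_self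
        have hset : (hit.set kg.2 true).getD g false = true := by
          rw [hg, List.getD_eq_getElem _ _ (by simpa using hlt)]
          exact List.getElem_set_self (h := by simpa using hlt)
        rw [hset]
        simp [hg, hp]
      · have hset : (hit.set kg.2 true).getD g false = hit.getD g false := by
          rcases Nat.lt_or_ge g hit.length with hlt | hge
          · rw [List.getD_eq_getElem _ _ (by simpa using hlt),
              List.getD_eq_getElem _ _ hlt]
            exact List.getElem_set_ne hg (by simpa using hlt)
          · rw [List.getD_eq_default _ _ (by simpa using hge),
              List.getD_eq_default _ _ hge]
        rw [hset]
        have hbeq : (kg.2 == g) = false := by simpa using hg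
        simp [hbeq]
    · rw [if_neg hp, ih _ (fun x hx => hb x (List.mem_cons_of_mem _ hx))]
      simp [hp]

-- the same fold preserves the length of the hits vector
theorem pv_length_foldl_set (p : String × Nat → Bool) :
    ∀ (cs : List (String × Nat)) (hit : List Bool),
      (cs.foldl (fun h kg => if p kg then h.set kg.2 true else h) hit).length = hit.length := by
  intro cs
  induction cs with
  | nil => intro hit; simp
  | cons kg cs ih =>
    intro hit
    rw [List.foldl_cons]
    by_cases hp : p kg
    · rw [if_pos hp, ih, List.length_set]
    · rw [if_neg hp, ih]

-- the outer scan also preserves the length of the hits vector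
theorem pv_scan_length (text : List Char) :
    ∀ (is : List Nat) (hit : List Bool),
      ((is.foldl
          (fun h (i : Nat) =>
            (PySem.Dict.getD pvIndex (PySem.List.pyGetD text (i : Int) ' ') []).foldl
              (fun h kg => if PySem.Chars.startswith (text.drop i) kg.1.toList
                then h.set kg.2 true else h) h) hit).length = hit.length) := by
  intro is
  induction is with
  | nil => intro hit; simp
  | cons i is ih =>
    intro hit
    rw [List.foldl_cons, ih, pv_length_foldl_set]

-- the whole scan, read back pointwise: group g is hit iff some position fires some
-- candidate of the bucket of the character there with group index g
theorem pv_scan (text : List Char) (g : Nat) :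
    ∀ (n : Nat) (hit : List Bool), hit.length = pvGroups.length →
      (((List.range n).foldl
          (fun h (i : Nat) =>
            (PySem.Dict.getD pvIndex (PySem.List.pyGetD text (i : Int) ' ') []).foldl
              (fun h kg => if PySem.Chars.startswith (text.drop i) kg.1.toList
                then h.set kg.2 true else h) h) hit).getD g false
        = (hit.getD g false || (List.range n).any (fun i =>
            (PySem.Dict.getD pvIndex (PySem.List.pyGetD text (i : Int) ' ') []).any
              (fun kg => kg.2 == g && PySem.Chars.startswith (text.drop i) kg.1.toList)))) := by
  intro n
  induction n with
  | zero => intro hit _; simp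
  | succ n ih =>
    intro hit hlen
    rw [List.range_succ, List.foldl_append, List.foldl_cons, List.foldl_nil,
      List.any_append, List.any_cons, List.any_nil]
    have hlen' : ((List.range n).foldl
        (fun h (i : Nat) =>
          (PySem.Dict.getD pvIndex (PySem.List.pyGetD text (i : Int) ' ') []).foldl
            (fun h kg => if PySem.Chars.startswith (text.drop i) kg.1.toList
              then h.set kg.2 true else h) h) hit).length = pvGroups.length := by
      rw [pv_scan_length]; exact hlen
    rw [pv_getD_foldl_set _ g _ _
      (fun kg hkg => by rw [hlen']; exact (pv_bucket_sound _ kg hkg).1), ih hit hlen]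
    simp [Bool.or_assoc]

-- position/candidate firing is exactly "some keyword of group g occurs in text"
theorem pv_scan_iff_isIn (text : List Char) (gp : (List String × Int) × Nat)
    (hgp : gp ∈ pvGroups.zipIdx) :
    ((List.range text.length).any (fun i =>
        (PySem.Dict.getD pvIndex (PySem.List.pyGetD text (i : Int) ' ') []).any
          (fun kg => kg.2 == gp.2 && PySem.Chars.startswith (text.drop i) kg.1.toList)))
      = gp.1.1.any (fun k => PySem.Chars.isIn k.toList text) := by
  obtain ⟨hglt, hgget⟩ := pv_zipIdx_spec gp hgp
  rw [Bool.eq_iff_iff]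
  simp only [List.any_eq_true, List.mem_range, Bool.and_eq_true, beq_iff_eq]
  constructor
  · rintro ⟨i, hi, kg, hkg, hg, hsw⟩
    obtain ⟨hlt, hmem, -⟩ := pv_bucket_sound _ kg hkg
    rw [hg, List.getD_eq_getElem _ _ hglt, ← hgget] at hmem
    refine ⟨kg.1, hmem, ?_⟩
    exact (PySem.Chars.exists_prefix_drop_iff_isIn (sub := kg.1.toList) (s := text)).mp
      ⟨i, (PySem.Chars.startswith_iff _ _).mp hsw⟩
  · rintro ⟨k, hk, hin⟩
    obtain ⟨j, hj⟩ := (PySem.Chars.exists_prefix_drop_iff_isIn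
      (sub := k.toList) (s := text)).mpr hin
    have hcmpl := pv_complete gp hgp k hk
    have hkne : k.toList ≠ [] := (pv_bucket_sound _ (k, gp.2) hcmpl).2.2
    -- k is a nonempty prefix of text.drop j, so j < len and text[j] is k's first char
    obtain ⟨t, ht⟩ := hj
    have hjl : j < text.length := by
      by_contra hge
      have hnil : text.drop j = [] := List.drop_eq_nil_of_le (by omega)
      rw [hnil] at ht
      exact hkne (List.append_eq_nil_iff.mp ht |>.1)
    have hchar : text[j] = k.toList.headD ' ' := by
      have hhd : (text.drop j).headD ' ' = k.toList.headD ' ' := by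
        rw [← ht]
        cases hc : k.toList with
        | nil => exact absurd hc hkne
        | cons a l => simp
      rw [← hhd, ← List.getElem_cons_drop hjl]
      simp [List.getElem?_eq_getElem hjl]
    have hpg : PySem.List.pyGetD text (j : Int) ' ' = k.toList.headD ' ' := by
      rw [PySem.List.pyGetD_natCast, List.getD_eq_getElem _ _ hjl, hchar]
    refine ⟨j, hjl, (k, gp.2), ?_, rfl,
      (PySem.Chars.startswith_iff _ _).mpr ⟨t, ht⟩⟩
    rw [hpg]
    exact hcmpl

-- ===== VERDICT (by name: the statement is the Claim_ definition above) =====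
set_option maxHeartbeats 2000000 in
theorem compute_priority_score_py_spec : Claim_equal_compute_priority_score_py := by
  intro title summary _
  unfold Spec_compute_priority_score_py
  simp only [compute_priority_score_py, compute_priority_score_py_alt]
  set text := PySem.Chars.lower (title.toList ++ [' '] ++ summary.toList) with htext
  rw [PySem.List.enumerate_eq_map_pyRange (d := ' '), PySem.List.len_eq,
    PySem.List.pyRange_zero_natCast, List.map_map, List.foldl_map]
  simp only [Function.comp, Int.toNat_natCast]
  have hfinal : (List.range text.length).foldl
      (fun hit (i : Nat) =>
        (PySem.Dict.getD pvIndex (PySem.List.pyGetD text (i : Int) ' ') []).foldl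
          (fun hit kg => if PySem.Chars.startswith (text.drop i) kg.1.toList
            then hit.set kg.2 true else hit) hit)
      (pvGroups.map fun _ => false)
      = pvGroups.map (fun g => g.1.any (fun k => PySem.Chars.isIn k.toList text)) := by
    apply List.ext_getElem
    · rw [pv_scan_length, List.length_map, List.length_map]
    · intro g h1 h2
      rw [← List.getD_eq_getElem _ false h1, ← List.getD_eq_getElem _ false h2,
        pv_scan text g text.length _ (by rw [List.length_map])]
      have hglen : g < pvGroups.length := by
        rw [pv_scan_length, List.length_map] at h1
        exact h1
      have h0 : (pvGroups.map (fun _ => false)).getD g false = false := by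
        rw [List.getD_eq_getElem _ false (by rw [List.length_map]; exact hglen)]
        simp
      rw [h0, Bool.false_or,
        pv_scan_iff_isIn text (pvGroups[g], g)
          (by simp [List.mem_zipIdx_iff_getElem?, hglen]),
        List.getD_eq_getElem _ false h2, List.getElem_map]
  refine Eq.trans ?_ (congrArg (fun X : List Bool =>
    List.foldl (fun acc p => if p.1 then acc + p.2.2 else acc) 0 (X.zip pvGroups)) hfinal).symm
  rw [pv_zip_map_self]
  simp only [pvGroups, List.map_cons, List.map_nil, List.foldl_cons, List.foldl_nil,
    List.any_cons, List.any_nil, Bool.or_false]
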